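-- pv_equiv track=rewrite | github.com/zaka41a/CogniGrid-AI | backend/graphrag/app/core/llm_client.py | _context_fallback
-- ===== SOURCE A (Python) =====
-- def _context_fallback(prompt: str) -> tuple[str, int]:
--     """
--     When no LLM is available, extract the key context blocks from the prompt
--     and return them as a structured answer.
--     """
--     lines = prompt.split("\n")
--     context_lines = []
--     in_doc = in_graph = False
--     for line in lines:
--         if "=== Document Context ===" in line:
--             in_doc = True; in_graph = False; continue
--         if "=== Knowledge Graph Context ===" in line:
--             in_graph = True; in_doc = False; continue
--         if "===" in line:
--             in_doc = in_graph = False; continue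
--         if (in_doc or in_graph) and line.strip():
--             context_lines.append(line.strip())
--
--     if context_lines:
--         answer = (
--             "**Based on the knowledge graph and indexed documents:**\n\n"
--             + "\n".join(f"• {l}" for l in context_lines[:12])
--             + "\n\n*Note: No LLM is configured. Configure ANTHROPIC_API_KEY or OPENAI_API_KEY for AI-generated answers.*"
--         )
--     else:
--         answer = (
--             "No relevant context found in the knowledge graph for your query. "
--             "Try uploading CIM files first, or configure an LLM provider (ANTHROPIC_API_KEY / OPENAI_API_KEY)."
--         )
--     return answer, len(answer.split())
-- ===== SOURCE B (Python) =====
-- def _collect(lines):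
--     # segment walker: find each marker line, then consume its whole segment at once
--     out = []
--     i = 0
--     n = len(lines)
--     while i < n:
--         line = lines[i]
--         if "===" not in line:
--             i += 1
--             continue
--         keep = ("=== Document Context ===" in line
--                 or "=== Knowledge Graph Context ===" in line)
--         j = i + 1
--         while j < n and "===" not in lines[j]:
--             j += 1
--         if keep:
--             for seg_line in lines[i + 1:j]:
--                 s = seg_line.strip()
--                 if s:
--                     out.append(s)
--         i = j
--     return out
--
--
-- def _context_fallback(prompt: str) -> tuple[str, int]:
--     context_lines = _collect(prompt.split("\n"))
--     if context_lines:
--         answer = (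
--             "**Based on the knowledge graph and indexed documents:**\n\n"
--             + "\n".join(f"• {l}" for l in context_lines[:12])
--             + "\n\n*Note: No LLM is configured. Configure ANTHROPIC_API_KEY or OPENAI_API_KEY for AI-generated answers.*"
--         )
--     else:
--         answer = (
--             "No relevant context found in the knowledge graph for your query. "
--             "Try uploading CIM files first, or configure an LLM provider (ANTHROPIC_API_KEY / OPENAI_API_KEY)."
--         )
--     return answer, len(answer.split())
-- ===== Notes on version B (the rewrite author's own statement) =====
-- stated objective: alternative
-- what changed: Replaces A's per-line flag state machine (in_doc/in_graph booleans updated on every line) with a segment walker that jumps from marker line to marker line and consumes each inter-marker segment in one inner pass, keeping it only if its marker is a doc/graph marker.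
import Mathlib
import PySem

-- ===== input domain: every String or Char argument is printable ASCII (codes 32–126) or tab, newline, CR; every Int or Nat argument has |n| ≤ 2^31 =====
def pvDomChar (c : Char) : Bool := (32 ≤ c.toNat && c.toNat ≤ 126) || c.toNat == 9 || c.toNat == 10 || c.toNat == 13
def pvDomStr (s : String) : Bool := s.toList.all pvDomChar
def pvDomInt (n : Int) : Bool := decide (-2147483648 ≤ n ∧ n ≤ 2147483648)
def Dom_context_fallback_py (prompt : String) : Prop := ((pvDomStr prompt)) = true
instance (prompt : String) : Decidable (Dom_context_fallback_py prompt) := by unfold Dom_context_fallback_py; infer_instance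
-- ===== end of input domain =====

-- B replaces A's per-line boolean state machine by a marker-to-marker segment walker (alternative decomposition, same cost).

-- ===== PORT A =====
def context_fallback_py (prompt : String) : String × Int :=
  let lines := (PySem.Str.split? prompt "\n").getD []
  let st := lines.foldl (fun (st : List String × Bool × Bool) line =>
      if PySem.Str.isIn "=== Document Context ===" line then (st.1, true, false)
      else if PySem.Str.isIn "=== Knowledge Graph Context ===" line then (st.1, false, true)
      else if PySem.Str.isIn "===" line then (st.1, false, false)
      else if (st.2.1 || st.2.2) && (PySem.Str.strip line != "") then
        (st.1 ++ [PySem.Str.strip line], st.2.1, st.2.2)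
      else st) ([], false, false)
  let contextLines := st.1
  let answer :=
    if contextLines ≠ [] then
      "**Based on the knowledge graph and indexed documents:**\n\n"
      ++ PySem.Str.join "\n" ((contextLines.take 12).map (fun l => "• " ++ l))
      ++ "\n\n*Note: No LLM is configured. Configure ANTHROPIC_API_KEY or OPENAI_API_KEY for AI-generated answers.*"
    else
      "No relevant context found in the knowledge graph for your query. Try uploading CIM files first, or configure an LLM provider (ANTHROPIC_API_KEY / OPENAI_API_KEY)."
  (answer, ((PySem.Str.split₀ answer).length : Int))

-- ===== PORT B =====
def pvHasMarker (l : String) : Bool := PySem.Str.isIn "===" l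
def pvKeepMarker (l : String) : Bool :=
  PySem.Str.isIn "=== Document Context ===" l || PySem.Str.isIn "=== Knowledge Graph Context ===" l
def pvStripNonempty (seg : List String) : List String :=
  (seg.map PySem.Str.strip).filter (fun s => s != "")

def pvCollectB : List String → List String
  | [] => []
  | l :: r =>
    if pvHasMarker l then
      (if pvKeepMarker l then pvStripNonempty (r.takeWhile (fun x => !pvHasMarker x)) else [])
      ++ pvCollectB (r.dropWhile (fun x => !pvHasMarker x))
    else pvCollectB r
termination_by l => l.length
decreasing_by
  · simpa using Nat.lt_succ_of_le (List.length_dropWhile_le _ _)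
  · simp

def context_fallback_py_alt (prompt : String) : String × Int :=
  let contextLines := pvCollectB ((PySem.Str.split? prompt "\n").getD [])
  let answer :=
    if contextLines ≠ [] then
      "**Based on the knowledge graph and indexed documents:**\n\n"
      ++ PySem.Str.join "\n" ((contextLines.take 12).map (fun l => "• " ++ l))
      ++ "\n\n*Note: No LLM is configured. Configure ANTHROPIC_API_KEY or OPENAI_API_KEY for AI-generated answers.*"
    else
      "No relevant context found in the knowledge graph for your query. Try uploading CIM files first, or configure an LLM provider (ANTHROPIC_API_KEY / OPENAI_API_KEY)."
  (answer, ((PySem.Str.split₀ answer).length : Int))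

-- ===== PRECONDITION & SPEC =====
def Spec_context_fallback_py (prompt : String) (out : String × Int) : Prop := out = context_fallback_py_alt prompt
instance (prompt : String) (out : String × Int) : Decidable (Spec_context_fallback_py prompt out) := by unfold Spec_context_fallback_py; infer_instance

-- ===== CLAIM (what is proved, stated in full; the proofs are below) =====
def Claim_equal_context_fallback_py : Prop := ∀ (prompt : String), Dom_context_fallback_py prompt → Spec_context_fallback_py prompt (context_fallback_py prompt)

-- ===== LEMMAS AND PROOFS =====

-- recursive characterisation of A's fold (state = the two flags, accumulator factored out)
def pvRecA : List String → Bool → Bool → List String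
  | [], _, _ => []
  | l :: r, d, g =>
    if PySem.Str.isIn "=== Document Context ===" l then pvRecA r true false
    else if PySem.Str.isIn "=== Knowledge Graph Context ===" l then pvRecA r false true
    else if PySem.Str.isIn "===" l then pvRecA r false false
    else if (d || g) && (PySem.Str.strip l != "") then PySem.Str.strip l :: pvRecA r d g
    else pvRecA r d g

lemma pvFoldA_eq (lines : List String) (acc : List String) (d g : Bool) :
    (lines.foldl (fun (st : List String × Bool × Bool) line =>
      if PySem.Str.isIn "=== Document Context ===" line then (st.1, true, false)
      else if PySem.Str.isIn "=== Knowledge Graph Context ===" line then (st.1, false, true)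
      else if PySem.Str.isIn "===" line then (st.1, false, false)
      else if (st.2.1 || st.2.2) && (PySem.Str.strip line != "") then
        (st.1 ++ [PySem.Str.strip line], st.2.1, st.2.2)
      else st) (acc, d, g)).1 = acc ++ pvRecA lines d g := by
  induction lines generalizing acc d g with
  | nil => simp [pvRecA]
  | cons l r ih =>
    simp only [List.foldl_cons, pvRecA]
    split_ifs with h1 h2 h3 h4
    · exact ih acc true false
    · exact ih acc false true
    · exact ih acc false false
    · rw [ih]; simp
    · exact ih acc d g

lemma pvCollectB_dropWhile (lines : List String) :
    pvCollectB lines = pvCollectB (lines.dropWhile (fun x => !pvHasMarker x)) := by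
  induction lines with
  | nil => simp
  | cons l r ih =>
    by_cases h : pvHasMarker l
    · simp [h]
    · rw [pvCollectB, if_neg h, List.dropWhile_cons]
      simp [h, ih]

lemma pvRecA_eq (lines : List String) (d g : Bool) :
    pvRecA lines d g =
      (if (d || g) then pvStripNonempty (lines.takeWhile (fun x => !pvHasMarker x)) else [])
      ++ pvCollectB (lines.dropWhile (fun x => !pvHasMarker x)) := by
  induction lines generalizing d g with
  | nil => rw [pvCollectB.eq_def]; simp [pvRecA, pvStripNonempty]
  | cons l r ih =>
    by_cases hm : pvHasMarker l
    · have ht : (l :: r).takeWhile (fun x => !pvHasMarker x) = [] := by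
        simp [hm]
      have hd : (l :: r).dropWhile (fun x => !pvHasMarker x) = l :: r := by
        simp [hm]
      rw [ht, hd]
      rw [pvCollectB, if_pos hm]
      by_cases h1 : PySem.Str.isIn "=== Document Context ===" l
      · have hk : pvKeepMarker l = true := by unfold pvKeepMarker; rw [h1]; rfl
        rw [pvRecA, if_pos h1, ih]
        simp [hk, pvStripNonempty]
      · by_cases h2 : PySem.Str.isIn "=== Knowledge Graph Context ===" l
        · have hk : pvKeepMarker l = true := by unfold pvKeepMarker; rw [h2]; simp
          rw [pvRecA, if_neg h1, if_pos h2, ih]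
          simp [hk, pvStripNonempty]
        · have hk : pvKeepMarker l = false := by
            unfold pvKeepMarker
            rw [eq_false_of_ne_true h1, eq_false_of_ne_true h2]
            rfl
          have h3 : PySem.Str.isIn "===" l := hm
          rw [pvRecA, if_neg h1, if_neg h2, if_pos h3, ih]
          simp [hk, pvStripNonempty]
    · have hsub : ∀ sub : String, ("===".toList <:+: sub.toList) →
          PySem.Str.isIn sub l = true → pvHasMarker l = true := by
        intro sub hpre hIn
        have h2 := (PySem.Str.isIn_iff_infix sub l).mp hIn
        exact (PySem.Str.isIn_iff_infix "===" l).mpr (hpre.trans h2)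
      have h1 : PySem.Str.isIn "=== Document Context ===" l = false := by
        cases hEq : PySem.Str.isIn "=== Document Context ===" l
        · rfl
        · exact absurd (hsub _ (by decide) hEq) hm
      have h2 : PySem.Str.isIn "=== Knowledge Graph Context ===" l = false := by
        cases hEq : PySem.Str.isIn "=== Knowledge Graph Context ===" l
        · rfl
        · exact absurd (hsub _ (by decide) hEq) hm
      have h3 : PySem.Str.isIn "===" l = false := by
        simpa [pvHasMarker] using hm
      have ht : (l :: r).takeWhile (fun x => !pvHasMarker x) = l :: r.takeWhile (fun x => !pvHasMarker x) := by
        simp [hm]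
      have hd : (l :: r).dropWhile (fun x => !pvHasMarker x) = r.dropWhile (fun x => !pvHasMarker x) := by
        simp [hm]
      rw [ht, hd]
      rw [pvRecA, if_neg (by rw [h1]; simp), if_neg (by rw [h2]; simp), if_neg (by rw [h3]; simp), ih]
      by_cases hb : (d || g) = true
      · simp only [hb, if_true]
        by_cases hs : (PySem.Str.strip l != "") = true
        · simp [hs, pvStripNonempty]
        · simp only [hs]
          simp at hs
          simp [pvStripNonempty, hs]
      · simp only [hb]
        simp

theorem pv_main (lines : List String) :
    (lines.foldl (fun (st : List String × Bool × Bool) line =>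
      if PySem.Str.isIn "=== Document Context ===" line then (st.1, true, false)
      else if PySem.Str.isIn "=== Knowledge Graph Context ===" line then (st.1, false, true)
      else if PySem.Str.isIn "===" line then (st.1, false, false)
      else if (st.2.1 || st.2.2) && (PySem.Str.strip line != "") then
        (st.1 ++ [PySem.Str.strip line], st.2.1, st.2.2)
      else st) ([], false, false)).1 = pvCollectB lines := by
  rw [pvFoldA_eq, pvRecA_eq, pvCollectB_dropWhile lines]
  simp

-- ===== VERDICT (by name: the statement is the Claim_ definition above) =====
theorem context_fallback_py_spec : Claim_equal_context_fallback_py := by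
  intro prompt _
  unfold Spec_context_fallback_py
  simp only [context_fallback_py, context_fallback_py_alt, pv_main]
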